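-- pv_equiv track=rewrite | github.com/Ramphy0x90/Doc_obfuscation | main.py | obfuscateText
-- ===== SOURCE A (Python) =====
-- def obfuscateText(text: str) -> list:
--     main_chars = {
--         'A': '\u0391',  # Greek chars
--         'B': '\u0392',
--         'C': '\u03f9',
--         'H': '\u0397',
--         'T': '\u03a4',
--         'P': '\u0420',  # Cyrillic chars
--         'M': '\u041c',
--         'a': '\u0430',
--         'c': '\u0441',
--         's': '\u0455',
--         'i': '\u0456',
--         'x': '\u0445',
--         'n': '\u0578',  # Armenian chars
--         'h': '\u0570'
--     }
--
--     final_text = ''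
--     changed_chars = 0
--     original_ascii = []
--     obfuscated_ascii = []
--
--     for char in text:
--         original_ascii.append(ord(char))
--
--         try:
--             obfuscated_ascii.append(ord(main_chars[char]))
--             final_text += main_chars[char]
--             changed_chars += 1
--         except KeyError:
--             obfuscated_ascii.append(ord(char))
--             final_text += char
--
--     return [final_text, str(original_ascii)[1:-1], str(obfuscated_ascii)[1:-1], changed_chars]
-- ===== SOURCE B (Python) =====
-- def obfuscateText(text: str) -> list:
--     main_chars = {
--         'A': '\u0391', 'B': '\u0392', 'C': '\u03f9', 'H': '\u0397',
--         'T': '\u03a4', 'P': '\u0420', 'M': '\u041c', 'a': '\u0430',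
--         'c': '\u0441', 's': '\u0455', 'i': '\u0456', 'x': '\u0445',
--         'n': '\u0578', 'h': '\u0570',
--     }
--     final_text = text.translate({ord(k): v for k, v in main_chars.items()})
--     original_ascii = [ord(c) for c in text]
--     obfuscated_ascii = [ord(c) for c in final_text]
--     changed_chars = sum(1 for c in text if c in main_chars)
--     return [final_text, str(original_ascii)[1:-1], str(obfuscated_ascii)[1:-1], changed_chars]
-- ===== Notes on version B (the rewrite author's own statement) =====
-- stated objective: idiomatic
-- what changed: Replaces A's single fused loop (string concatenation + two appended lists + a try/except counter) by independent passes: str.translate for the obfuscated text, two list comprehensions for the ASCII lists, and a sum() for the changed-character count.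
import Mathlib
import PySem

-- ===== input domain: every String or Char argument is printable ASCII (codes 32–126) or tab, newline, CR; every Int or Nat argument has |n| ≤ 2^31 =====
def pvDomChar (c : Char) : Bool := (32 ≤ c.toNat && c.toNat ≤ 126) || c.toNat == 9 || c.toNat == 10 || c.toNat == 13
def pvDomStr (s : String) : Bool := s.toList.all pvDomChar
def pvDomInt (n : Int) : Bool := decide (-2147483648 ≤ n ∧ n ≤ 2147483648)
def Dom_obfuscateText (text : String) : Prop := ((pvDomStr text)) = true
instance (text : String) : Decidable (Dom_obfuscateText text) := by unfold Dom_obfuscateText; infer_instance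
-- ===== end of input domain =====

-- B splits A's fused loop into independent passes (translate / two ord passes / a membership count); same output, same cost.

-- shared constant: the main_chars dict literal (insertion order as in the Python)
def pvMainChars : PySem.Dict Char Char := PySem.Dict.ofList
  [('A', 'Α'), ('B', 'Β'), ('C', 'Ϲ'), ('H', 'Η'), ('T', 'Τ'), ('P', 'Р'), ('M', 'М'),
   ('a', 'а'), ('c', 'с'), ('s', 'ѕ'), ('i', 'і'), ('x', 'х'), ('n', 'ո'), ('h', 'հ')]

-- str(list_of_ints)[1:-1]: "a, b, c" (empty list -> "")
def pvListStrInner (ls : List Int) : String := String.intercalate ", " (ls.map PySem.Int.toStr)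

-- ===== PORT A =====
-- the loop body: state (final_text, changed_chars, original_ascii, obfuscated_ascii)
def obfuscateStep (s : String × Int × List Int × List Int) (char : Char) :
    String × Int × List Int × List Int :=
  let (finalText, changed, origA, obfA) := s
  let origA := origA ++ [(char.toNat : Int)]
  match PySem.Dict.get? pvMainChars char with
  | some v => (finalText.push v, changed + 1, origA, obfA ++ [(v.toNat : Int)])  -- key found
  | none   => (finalText.push char, changed, origA, obfA ++ [(char.toNat : Int)])  -- KeyError branch

def obfuscateText (text : String) : String × String × String × Int :=
  let st := text.toList.foldl obfuscateStep ("", 0, [], [])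
  (st.1, pvListStrInner st.2.2.1, pvListStrInner st.2.2.2, st.2.1)

-- ===== PORT B =====
-- text.translate(table) applied per char
def pvMapChar (c : Char) : Char := (PySem.Dict.get? pvMainChars c).getD c

def obfuscateText_alt (text : String) : String × String × String × Int :=
  let finalText := String.ofList (text.toList.map pvMapChar)
  let originalAscii := text.toList.map (fun c => (c.toNat : Int))
  let obfuscatedAscii := finalText.toList.map (fun c => (c.toNat : Int))
  let changedChars : Int := (text.toList.filter (fun c => PySem.Dict.contains pvMainChars c)).length
  (finalText, pvListStrInner originalAscii, pvListStrInner obfuscatedAscii, changedChars)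

-- ===== PRECONDITION & SPEC =====
def Spec_obfuscateText (text : String) (out : String × String × String × Int) : Prop := out = obfuscateText_alt text
instance (text : String) (out : String × String × String × Int) : Decidable (Spec_obfuscateText text out) := by unfold Spec_obfuscateText; infer_instance

-- ===== CLAIM (what is proved, stated in full; the proofs are below) =====
def Claim_equal_obfuscateText : Prop := ∀ (text : String), Dom_obfuscateText text → Spec_obfuscateText text (obfuscateText text)

-- ===== LEMMAS AND PROOFS =====

lemma pv_push_mk (s : String) (c : Char) (l : List Char) :
    (s.push c) ++ String.ofList l = s ++ String.ofList (c :: l) := by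
  apply String.ext
  simp

lemma pv_loop_eq (cs : List Char) (f : String) (n : Int) (o b : List Int) :
    cs.foldl obfuscateStep (f, n, o, b) =
      (f ++ String.ofList (cs.map pvMapChar),
       n + (cs.filter (fun c => PySem.Dict.contains pvMainChars c)).length,
       o ++ cs.map (fun c => (c.toNat : Int)),
       b ++ cs.map (fun c => ((pvMapChar c).toNat : Int))) := by
  induction cs generalizing f n o b with
  | nil => simp
  | cons c cs ih =>
    simp only [List.foldl_cons]
    rcases h : PySem.Dict.get? pvMainChars c with _ | v
    · have hc : PySem.Dict.contains pvMainChars c = false := by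
        simp [PySem.Dict.contains_eq_isSome_get?, h]
      simp [obfuscateStep, h, ih, pv_push_mk, pvMapChar, hc]
    · have hc : PySem.Dict.contains pvMainChars c = true := by
        simp [PySem.Dict.contains_eq_isSome_get?, h]
      simp [obfuscateStep, h, ih, pv_push_mk, pvMapChar, hc]
      omega

-- ===== VERDICT (by name: the statement is the Claim_ definition above) =====
theorem obfuscateText_spec : Claim_equal_obfuscateText := by
  intro text _
  show _ = _
  simp [obfuscateText, obfuscateText_alt, pv_loop_eq, List.map_map, Function.comp_def]
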